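-- pv_equiv track=rewrite | github.com/xQUANTUMTECH/linkedin-bot-ai | grok_api.py | _extract_roi_info
-- ===== SOURCE A (Python) =====
-- from typing import Dict, List, Optional
--
-- def _extract_roi_info(result: str) -> Dict[str, str]:
--     """Estrae analisi ROI e alternative concrete"""
--     lines = result.split('\n')
--     better_option = ""
--     concrete_roi = ""
--
--     for line in lines:
--         if any(keyword in line.lower() for keyword in ['alternative', 'instead', 'better', 'successful']):
--             better_option = line.strip()[:90]
--         elif any(keyword in line.lower() for keyword in ['roi', 'return', 'efficiency', 'productivity', '%']):
--             concrete_roi = line.strip()[:70]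
--
--     return {
--         'better_option': better_option or "investire in infrastrutture reali",
--         'concrete_roi': concrete_roi or "efficienza +300% vs burocrazia"
--     }
-- ===== SOURCE B (Python) =====
-- def _extract_roi_info(result: str):
--     """Backward scan with early exit: take the last matching line of each category."""
--     BETTER = ['alternative', 'instead', 'better', 'successful']
--     ROI = ['roi', 'return', 'efficiency', 'productivity', '%']
--     better_option = None
--     concrete_roi = None
--     for line in reversed(result.split('\n')):
--         low = line.lower()
--         if any(k in low for k in BETTER):
--             if better_option is None:
--                 better_option = line.strip()[:90]
--         elif concrete_roi is None and any(k in low for k in ROI):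
--             concrete_roi = line.strip()[:70]
--         if better_option is not None and concrete_roi is not None:
--             break
--     return {
--         'better_option': better_option or "investire in infrastrutture reali",
--         'concrete_roi': concrete_roi or "efficienza +300% vs burocrazia"
--     }
-- ===== Notes on version B (the rewrite author's own statement) =====
-- stated objective: alternative
-- what changed: Replaces the forward overwrite loop by a backward scan that fixes each field at its first match from the end and breaks as soon as both are set.
import Mathlib
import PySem

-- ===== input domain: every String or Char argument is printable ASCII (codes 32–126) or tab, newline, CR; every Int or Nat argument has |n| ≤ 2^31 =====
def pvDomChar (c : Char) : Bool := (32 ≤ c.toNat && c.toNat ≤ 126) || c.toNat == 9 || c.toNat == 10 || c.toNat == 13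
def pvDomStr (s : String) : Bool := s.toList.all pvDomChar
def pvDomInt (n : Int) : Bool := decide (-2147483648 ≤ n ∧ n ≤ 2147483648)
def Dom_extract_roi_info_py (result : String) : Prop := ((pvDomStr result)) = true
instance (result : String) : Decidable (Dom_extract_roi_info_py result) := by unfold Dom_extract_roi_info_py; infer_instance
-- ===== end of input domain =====

-- B replaces A's forward overwrite loop by a backward scan with early exit; objective: alternative decomposition (same complexity).

-- ===== PORT A =====
def pvBetterKw : List String := ["alternative", "instead", "better", "successful"]
def pvRoiKw : List String := ["roi", "return", "efficiency", "productivity", "%"]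

def extract_roi_info_py (result : String) : List (String × String) :=
  let lines := (PySem.Str.split? result "\n").getD []
  let st := lines.foldl (fun (st : String × String) line =>
    if pvBetterKw.any (fun k => PySem.Str.isIn k (PySem.Str.lower line)) then
      (PySem.Str.slice (PySem.Str.strip line) none (some 90), st.2)
    else if pvRoiKw.any (fun k => PySem.Str.isIn k (PySem.Str.lower line)) then
      (st.1, PySem.Str.slice (PySem.Str.strip line) none (some 70))
    else st) ("", "")
  [("better_option", if st.1 == "" then "investire in infrastrutture reali" else st.1),
   ("concrete_roi", if st.2 == "" then "efficienza +300% vs burocrazia" else st.2)]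

-- ===== PORT B =====
def pvBetterKwB : List String := ["alternative", "instead", "better", "successful"]
def pvRoiKwB : List String := ["roi", "return", "efficiency", "productivity", "%"]

def pvMatchB (kws : List String) (line : String) : Bool :=
  let low := PySem.Str.lower line
  kws.any (fun k => PySem.Str.isIn k low)

-- backward scan: fix each field at its FIRST match (scanning the reversed lines), break when both set
def pvScanB : List String → Option String → Option String → Option String × Option String
  | [], bo, cr => (bo, cr)
  | line :: rest, bo, cr =>
    let bo' := if pvMatchB pvBetterKwB line then
        (match bo with
          | none => some (PySem.Str.slice (PySem.Str.strip line) none (some 90))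
          | some b => some b)
      else bo
    let cr' := if pvMatchB pvBetterKwB line then cr
      else if cr.isNone && pvMatchB pvRoiKwB line then
        some (PySem.Str.slice (PySem.Str.strip line) none (some 70))
      else cr
    if bo'.isSome && cr'.isSome then (bo', cr') else pvScanB rest bo' cr'

def extract_roi_info_py_alt (result : String) : List (String × String) :=
  let st := pvScanB ((PySem.Str.split? result "\n").getD []).reverse none none
  [("better_option",
     match st.1 with
     | none => "investire in infrastrutture reali"
     | some s => if s == "" then "investire in infrastrutture reali" else s),
   ("concrete_roi",
     match st.2 with
     | none => "efficienza +300% vs burocrazia"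
     | some s => if s == "" then "efficienza +300% vs burocrazia" else s)]

-- ===== PRECONDITION & SPEC =====
def Spec_extract_roi_info_py (result : String) (out : List (String × String)) : Prop := out = extract_roi_info_py_alt result
instance (result : String) (out : List (String × String)) : Decidable (Spec_extract_roi_info_py result out) := by unfold Spec_extract_roi_info_py; infer_instance

-- ===== CLAIM (what is proved, stated in full; the proofs are below) =====
def Claim_equal_extract_roi_info_py : Prop := ∀ (result : String), Dom_extract_roi_info_py result → Spec_extract_roi_info_py result (extract_roi_info_py result)

-- ===== LEMMAS AND PROOFS =====
def pvPB (line : String) : Bool := pvBetterKw.any (fun k => PySem.Str.isIn k (PySem.Str.lower line))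
def pvPR (line : String) : Bool := pvRoiKw.any (fun k => PySem.Str.isIn k (PySem.Str.lower line))
def pvP2 (line : String) : Bool := !pvPB line && pvPR line
def pvCut90 (line : String) : String := PySem.Str.slice (PySem.Str.strip line) none (some 90)
def pvCut70 (line : String) : String := PySem.Str.slice (PySem.Str.strip line) none (some 70)

def pvStepA (st : String × String) (line : String) : String × String :=
  if pvPB line then (pvCut90 line, st.2)
  else if pvPR line then (st.1, pvCut70 line)
  else st

theorem pvMatchB_better (line : String) : pvMatchB pvBetterKwB line = pvPB line := rfl
theorem pvMatchB_roi (line : String) : pvMatchB pvRoiKwB line = pvPR line := rfl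

theorem pv_or_map_getD {a b : Type} (o u : Option a) (f : a → b) (d : b) :
    ((o.or u).map f).getD d = (o.map f).getD ((u.map f).getD d) := by
  cases o <;> simp

theorem pvStepA_fst (b c : String) (line : String) :
    (pvStepA (b, c) line).1 = ((List.find? pvPB [line]).map pvCut90).getD b := by
  cases hb : pvPB line <;> cases hr : pvPR line <;> simp [pvStepA, hb, hr, List.find?]

theorem pvStepA_snd (b c : String) (line : String) :
    (pvStepA (b, c) line).2 = ((List.find? pvP2 [line]).map pvCut70).getD c := by
  cases hb : pvPB line <;> cases hr : pvPR line <;> simp [pvStepA, pvP2, hb, hr, List.find?]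

theorem pvScanB_spec (ls : List String) : ∀ (bo cr : Option String),
    pvScanB ls bo cr =
      (bo.or ((ls.find? pvPB).map pvCut90), cr.or ((ls.find? pvP2).map pvCut70)) := by
  induction ls with
  | nil => intro bo cr; simp [pvScanB]
  | cons line rest ih =>
    intro bo cr
    cases hb : pvPB line <;> cases hr : pvPR line <;> cases bo <;> cases cr <;>
      simp [pvScanB, pvMatchB_better, pvMatchB_roi, pvP2, hb, hr, ih,
            pvCut90, pvCut70, Option.or]

theorem pvFoldA_spec (ls : List String) : ∀ (b c : String),
    ls.foldl pvStepA (b, c) =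
      (((ls.reverse.find? pvPB).map pvCut90).getD b,
       ((ls.reverse.find? pvP2).map pvCut70).getD c) := by
  induction ls with
  | nil => intro b c; simp
  | cons line rest ih =>
    intro b c
    have hstep : pvStepA (b, c) line = ((pvStepA (b, c) line).1, (pvStepA (b, c) line).2) := rfl
    rw [List.foldl_cons, hstep, ih, List.reverse_cons, List.find?_append, List.find?_append,
        pv_or_map_getD, pv_or_map_getD, pvStepA_fst, pvStepA_snd]

theorem extract_roi_info_py_eq (result : String) :
    extract_roi_info_py result = extract_roi_info_py_alt result := by
  show
    (let lines := (PySem.Str.split? result "\n").getD []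
     let st := lines.foldl pvStepA ("", "")
     [("better_option", if st.1 == "" then "investire in infrastrutture reali" else st.1),
      ("concrete_roi", if st.2 == "" then "efficienza +300% vs burocrazia" else st.2)])
    = extract_roi_info_py_alt result
  unfold extract_roi_info_py_alt
  rw [pvScanB_spec]
  simp only [pvFoldA_spec, Option.none_or]
  cases ho1 : ((PySem.Str.split? result "\n").getD []).reverse.find? pvPB <;>
    cases ho2 : ((PySem.Str.split? result "\n").getD []).reverse.find? pvP2 <;>
      simp

-- ===== VERDICT (by name: the statement is the Claim_ definition above) =====
theorem extract_roi_info_py_spec : Claim_equal_extract_roi_info_py := by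
  intro result _
  unfold Spec_extract_roi_info_py
  exact extract_roi_info_py_eq result
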